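-- pv_equiv track=rewrite | github.com/crxticals-v2/metropolitan-analysis-tool | liveops.py | _group_assignments
-- ===== SOURCE A (Python) =====
-- _OVERWATCH = {"Sniper", "Drone Operator", "Stakeout 1", "Stakeout 2"}
--
-- def _group_assignments(assignments: dict) -> dict[str, dict]:
--     """Return assignments sorted into labelled team buckets, skipping empty ones."""
--     groups = {
--         "🎯 Overwatch":       {},
--         "🔵 Element Alpha":   {},
--         "🔵 Element Bravo":   {},
--         "🔵 Element Charlie": {},
--     }
--     for role, member in assignments.items():
--         if role in _OVERWATCH or role.startswith("Stakeout"):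
--             groups["🎯 Overwatch"][role] = member
--         elif role.endswith(" A") or "Alpha" in role:
--             groups["🔵 Element Alpha"][role] = member
--         elif role.endswith(" B") or "Bravo" in role:
--             groups["🔵 Element Bravo"][role] = member
--         elif role.endswith(" C") or "Charlie" in role:
--             groups["🔵 Element Charlie"][role] = member
--         else:
--             groups["🎯 Overwatch"][role] = member   # fallback
--     return {k: v for k, v in groups.items() if v}
-- ===== SOURCE B (Python) =====
-- _OVERWATCH = {"Sniper", "Drone Operator", "Stakeout 1", "Stakeout 2"}
-- _LABELS = ("🎯 Overwatch", "🔵 Element Alpha", "🔵 Element Bravo", "🔵 Element Charlie")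
--
--
-- def _label(role):
--     """Group label for a role (Overwatch doubles as the fallback)."""
--     if role in _OVERWATCH or role.startswith("Stakeout"):
--         return "🎯 Overwatch"
--     if role.endswith(" A") or "Alpha" in role:
--         return "🔵 Element Alpha"
--     if role.endswith(" B") or "Bravo" in role:
--         return "🔵 Element Bravo"
--     if role.endswith(" C") or "Charlie" in role:
--         return "🔵 Element Charlie"
--     return "🎯 Overwatch"
--
--
-- def _group_assignments(assignments: dict) -> dict[str, dict]:
--     groups = {}
--     for lbl in _LABELS:
--         bucket = {r: m for r, m in assignments.items() if _label(r) == lbl}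
--         if bucket:
--             groups[lbl] = bucket
--     return groups
-- ===== Notes on version B (the rewrite author's own statement) =====
-- stated objective: alternative
-- what changed: B is staged: instead of one pass that routes each role into a pre-seeded four-bucket dict and then filters out empty buckets, it makes one filtering pass per label (a dict comprehension selecting the roles whose label it is) and adds each bucket only if non-empty; classification precedence is factored into one pure helper that merges the Overwatch branch with the fallback.
import Mathlib
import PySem

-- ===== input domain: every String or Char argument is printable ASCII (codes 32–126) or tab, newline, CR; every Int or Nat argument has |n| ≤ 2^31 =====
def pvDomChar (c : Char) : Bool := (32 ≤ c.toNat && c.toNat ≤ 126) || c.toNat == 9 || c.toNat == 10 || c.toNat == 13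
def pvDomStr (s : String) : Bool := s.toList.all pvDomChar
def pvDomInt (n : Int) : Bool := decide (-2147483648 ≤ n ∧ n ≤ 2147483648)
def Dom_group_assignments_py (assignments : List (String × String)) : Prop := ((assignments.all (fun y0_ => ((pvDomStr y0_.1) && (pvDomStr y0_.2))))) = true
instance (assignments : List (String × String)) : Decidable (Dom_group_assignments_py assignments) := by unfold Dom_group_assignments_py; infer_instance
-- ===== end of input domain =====

-- B replaces A's single routing pass over a pre-seeded four-bucket dict (plus a final
-- empty-filter) with one filtering pass per label that adds only non-empty buckets
-- (objective: alternative decomposition; same O(n) cost).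

-- ===== PORT A =====
def pvOverwatch : PySem.Set String :=
  PySem.Set.ofList ["Sniper", "Drone Operator", "Stakeout 1", "Stakeout 2"]

-- loop body of A: groups[<label>][role] = member (inner dict updated in place; label always present)
def stepA (groups : PySem.Dict String (PySem.Dict String String)) (rm : String × String) :
    PySem.Dict String (PySem.Dict String String) :=
  let role := rm.1
  let member := rm.2
  if pvOverwatch.contains role || PySem.Str.startswith role "Stakeout" then
    groups.insert "🎯 Overwatch" ((groups.getD "🎯 Overwatch" PySem.Dict.empty).insert role member)
  else if PySem.Str.endswith role " A" || PySem.Str.isIn "Alpha" role then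
    groups.insert "🔵 Element Alpha" ((groups.getD "🔵 Element Alpha" PySem.Dict.empty).insert role member)
  else if PySem.Str.endswith role " B" || PySem.Str.isIn "Bravo" role then
    groups.insert "🔵 Element Bravo" ((groups.getD "🔵 Element Bravo" PySem.Dict.empty).insert role member)
  else if PySem.Str.endswith role " C" || PySem.Str.isIn "Charlie" role then
    groups.insert "🔵 Element Charlie" ((groups.getD "🔵 Element Charlie" PySem.Dict.empty).insert role member)
  else
    groups.insert "🎯 Overwatch" ((groups.getD "🎯 Overwatch" PySem.Dict.empty).insert role member)

def group_assignments_py (assignments : List (String × String)) : List (String × List (String × String)) :=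
  let groups : PySem.Dict String (PySem.Dict String String) :=
    PySem.Dict.ofList [("🎯 Overwatch", PySem.Dict.empty), ("🔵 Element Alpha", PySem.Dict.empty),
                       ("🔵 Element Bravo", PySem.Dict.empty), ("🔵 Element Charlie", PySem.Dict.empty)]
  let groups := assignments.foldl stepA groups
  -- {k: v for k, v in groups.items() if v}
  (groups.items.filter (fun p => !p.2.items.isEmpty)).map (fun p => (p.1, p.2.items))

-- ===== PORT B =====
def pvLabels : List String := ["🎯 Overwatch", "🔵 Element Alpha", "🔵 Element Bravo", "🔵 Element Charlie"]

def pvLabel (role : String) : String :=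
  if pvOverwatch.contains role || PySem.Str.startswith role "Stakeout" then "🎯 Overwatch"
  else if PySem.Str.endswith role " A" || PySem.Str.isIn "Alpha" role then "🔵 Element Alpha"
  else if PySem.Str.endswith role " B" || PySem.Str.isIn "Bravo" role then "🔵 Element Bravo"
  else if PySem.Str.endswith role " C" || PySem.Str.isIn "Charlie" role then "🔵 Element Charlie"
  else "🎯 Overwatch"

-- the dict comprehension {r: m for r, m in assignments.items() if _label(r) == lbl}
def stepL (lbl : String) (d : PySem.Dict String String) (rm : String × String) : PySem.Dict String String :=
  if pvLabel rm.1 = lbl then d.insert rm.1 rm.2 else d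

def pvBucket (assignments : List (String × String)) (lbl : String) : PySem.Dict String String :=
  assignments.foldl (stepL lbl) PySem.Dict.empty

def group_assignments_py_alt (assignments : List (String × String)) : List (String × List (String × String)) :=
  pvLabels.filterMap (fun lbl =>
    let bucket := pvBucket assignments lbl
    if bucket.items.isEmpty then none else some (lbl, bucket.items))

-- ===== PRECONDITION & SPEC =====
def Spec_group_assignments_py (assignments : List (String × String)) (out : List (String × List (String × String))) : Prop := out = group_assignments_py_alt assignments
instance (assignments : List (String × String)) (out : List (String × List (String × String))) : Decidable (Spec_group_assignments_py assignments out) := by unfold Spec_group_assignments_py; infer_instance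

-- ===== CLAIM (what is proved, stated in full; the proofs are below) =====
def Claim_equal_group_assignments_py : Prop := ∀ (assignments : List (String × String)), Dom_group_assignments_py assignments → Spec_group_assignments_py assignments (group_assignments_py assignments)

-- ===== LEMMAS AND PROOFS =====

-- A's group state: always exactly the four labelled buckets, in order.
def mk4 (a b c d : PySem.Dict String String) : PySem.Dict String (PySem.Dict String String) :=
  PySem.Dict.mk [("🎯 Overwatch", a), ("🔵 Element Alpha", b), ("🔵 Element Bravo", c), ("🔵 Element Charlie", d)]

theorem getD_mk4_O (a b c d : PySem.Dict String String) :
    (mk4 a b c d).getD "🎯 Overwatch" PySem.Dict.empty = a := by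
  simp [mk4, PySem.Dict.getD_eq_get?_getD, PySem.Dict.get?_mk_cons]

theorem getD_mk4_A (a b c d : PySem.Dict String String) :
    (mk4 a b c d).getD "🔵 Element Alpha" PySem.Dict.empty = b := by
  simp [mk4, PySem.Dict.getD_eq_get?_getD, PySem.Dict.get?_mk_cons]

theorem getD_mk4_B (a b c d : PySem.Dict String String) :
    (mk4 a b c d).getD "🔵 Element Bravo" PySem.Dict.empty = c := by
  simp [mk4, PySem.Dict.getD_eq_get?_getD, PySem.Dict.get?_mk_cons]

theorem getD_mk4_C (a b c d : PySem.Dict String String) :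
    (mk4 a b c d).getD "🔵 Element Charlie" PySem.Dict.empty = d := by
  simp [mk4, PySem.Dict.getD_eq_get?_getD, PySem.Dict.get?_mk_cons]

theorem insert_mk4_O (a b c d v : PySem.Dict String String) :
    (mk4 a b c d).insert "🎯 Overwatch" v = mk4 v b c d := by
  apply PySem.Dict.ext; simp [mk4, PySem.Dict.items_insert]

theorem insert_mk4_A (a b c d v : PySem.Dict String String) :
    (mk4 a b c d).insert "🔵 Element Alpha" v = mk4 a v c d := by
  apply PySem.Dict.ext; simp [mk4, PySem.Dict.items_insert]

theorem insert_mk4_B (a b c d v : PySem.Dict String String) :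
    (mk4 a b c d).insert "🔵 Element Bravo" v = mk4 a b v d := by
  apply PySem.Dict.ext; simp [mk4, PySem.Dict.items_insert]

theorem insert_mk4_C (a b c d v : PySem.Dict String String) :
    (mk4 a b c d).insert "🔵 Element Charlie" v = mk4 a b c v := by
  apply PySem.Dict.ext; simp [mk4, PySem.Dict.items_insert]

-- the single A-pass over the four seeded buckets equals four per-label passes
theorem foldA_eq : ∀ (xs : List (String × String)) (a b c d : PySem.Dict String String),
    xs.foldl stepA (mk4 a b c d)
      = mk4 (xs.foldl (stepL "🎯 Overwatch") a) (xs.foldl (stepL "🔵 Element Alpha") b)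
            (xs.foldl (stepL "🔵 Element Bravo") c) (xs.foldl (stepL "🔵 Element Charlie") d) := by
  intro xs
  induction xs with
  | nil => intro a b c d; simp
  | cons rm xs ih =>
    intro a b c d
    obtain ⟨r, m⟩ := rm
    rw [List.foldl_cons, List.foldl_cons, List.foldl_cons, List.foldl_cons, List.foldl_cons]
    by_cases h1 : (pvOverwatch.contains r || PySem.Str.startswith r "Stakeout") = true
    · have hl : pvLabel r = "🎯 Overwatch" := by simp only [pvLabel]; rw [if_pos h1]
      have eA : stepA (mk4 a b c d) (r, m) = mk4 (a.insert r m) b c d := by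
        simp only [stepA]; rw [if_pos h1, getD_mk4_O, insert_mk4_O]
      rw [eA, ih]
      simp [stepL, hl]
    · by_cases h2 : (PySem.Str.endswith r " A" || PySem.Str.isIn "Alpha" r) = true
      · have hl : pvLabel r = "🔵 Element Alpha" := by
          simp only [pvLabel]; rw [if_neg h1, if_pos h2]
        have eA : stepA (mk4 a b c d) (r, m) = mk4 a (b.insert r m) c d := by
          simp only [stepA]; rw [if_neg h1, if_pos h2, getD_mk4_A, insert_mk4_A]
        rw [eA, ih]
        simp [stepL, hl]
      · by_cases h3 : (PySem.Str.endswith r " B" || PySem.Str.isIn "Bravo" r) = true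
        · have hl : pvLabel r = "🔵 Element Bravo" := by
            simp only [pvLabel]; rw [if_neg h1, if_neg h2, if_pos h3]
          have eA : stepA (mk4 a b c d) (r, m) = mk4 a b (c.insert r m) d := by
            simp only [stepA]; rw [if_neg h1, if_neg h2, if_pos h3, getD_mk4_B, insert_mk4_B]
          rw [eA, ih]
          simp [stepL, hl]
        · by_cases h4 : (PySem.Str.endswith r " C" || PySem.Str.isIn "Charlie" r) = true
          · have hl : pvLabel r = "🔵 Element Charlie" := by
              simp only [pvLabel]; rw [if_neg h1, if_neg h2, if_neg h3, if_pos h4]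
            have eA : stepA (mk4 a b c d) (r, m) = mk4 a b c (d.insert r m) := by
              simp only [stepA]; rw [if_neg h1, if_neg h2, if_neg h3, if_pos h4, getD_mk4_C, insert_mk4_C]
            rw [eA, ih]
            simp [stepL, hl]
          · have hl : pvLabel r = "🎯 Overwatch" := by
              simp only [pvLabel]; rw [if_neg h1, if_neg h2, if_neg h3, if_neg h4]
            have eA : stepA (mk4 a b c d) (r, m) = mk4 (a.insert r m) b c d := by
              simp only [stepA]; rw [if_neg h1, if_neg h2, if_neg h3, if_neg h4, getD_mk4_O, insert_mk4_O]
            rw [eA, ih]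
            simp [stepL, hl]

-- ===== VERDICT (by name: the statement is the Claim_ definition above) =====
theorem group_assignments_py_spec : Claim_equal_group_assignments_py := by
  intro xs _
  show group_assignments_py xs = group_assignments_py_alt xs
  simp only [group_assignments_py, group_assignments_py_alt]
  have h0 : (PySem.Dict.ofList [("🎯 Overwatch", (PySem.Dict.empty : PySem.Dict String String)), ("🔵 Element Alpha", PySem.Dict.empty),
                       ("🔵 Element Bravo", PySem.Dict.empty), ("🔵 Element Charlie", PySem.Dict.empty)])
      = mk4 PySem.Dict.empty PySem.Dict.empty PySem.Dict.empty PySem.Dict.empty := by decide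
  rw [h0, foldA_eq]
  simp only [pvBucket, pvLabels, List.filterMap_cons, List.filterMap_nil]
  generalize List.foldl (stepL "🎯 Overwatch") PySem.Dict.empty xs = A
  generalize List.foldl (stepL "🔵 Element Alpha") PySem.Dict.empty xs = B
  generalize List.foldl (stepL "🔵 Element Bravo") PySem.Dict.empty xs = C
  generalize List.foldl (stepL "🔵 Element Charlie") PySem.Dict.empty xs = D
  by_cases ha : A.items = [] <;> by_cases hb : B.items = [] <;>
    by_cases hc : C.items = [] <;> by_cases hd : D.items = [] <;>
    simp [mk4, ha, hb, hc, hd, List.isEmpty_iff]
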